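-- pv_equiv track=rewrite | github.com/jkopczyn/qrcodepuzzle | process_count_grid.py | encode_grid_as_tatham_string
-- ===== SOURCE A (Python) =====
-- from typing import List, Tuple, Dict
--
-- def encode_grid_as_tatham_string(grid: List[str]) -> str:
--     if not grid or not grid[0]:
--         return "#0x0:"
--     height: int = len(grid)
--     width: int = len(grid[0])
--     if height != width:
--         raise ValueError("Grid must be square")
--     puzzle_string: str = f"#{height}x{width}:"
--     current_blanks: int = 0
--
--     # Flatten grid into sequence and convert strings to integers
--     flattened: List[int] = []
--     for row in grid:
--         for cell in row:
--             if cell == '-' or cell is None: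
--                 flattened.append(-1)
--             else:
--                 flattened.append(int(cell))
--
--     for num in flattened:
--         if num < 0:
--             current_blanks += 1
--             if current_blanks == 26:
--                 puzzle_string += 'z'
--                 current_blanks = 0
--         else:
--             if current_blanks > 0:
--                 puzzle_string += chr(ord('a') + current_blanks - 1)
--                 current_blanks = 0
--             puzzle_string += str(num)
--
--     if current_blanks > 0:
--         puzzle_string += chr(ord('a') + current_blanks - 1)
--     return puzzle_string
-- ===== SOURCE B (Python) =====
-- from typing import List
--
--
-- def encode_grid_as_tatham_string(grid: List[str]) -> str:
--     if not grid or not grid[0]: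
--         return "#0x0:"
--     height = len(grid)
--     width = len(grid[0])
--     if height != width:
--         raise ValueError("Grid must be square")
--     nums = [-1 if cell == '-' else int(cell) for row in grid for cell in row]
--
--     def blanks(g):
--         q, r = divmod(g, 26)
--         return 'z' * q + ('' if r == 0 else chr(ord('a') + r - 1))
--
--     # positions of the clue (non-blank) cells; blank runs are the gaps between them
--     clues = [(i, n) for i, n in enumerate(nums) if n >= 0]
--     parts = [f"#{height}x{width}:"]
--     prev = -1
--     for i, n in clues:
--         parts.append(blanks(i - prev - 1))
--         parts.append(str(n))
--         prev = i
--     parts.append(blanks(len(nums) - prev - 1))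
--     return ''.join(parts)
-- ===== Notes on version B (the rewrite author's own statement) =====
-- stated objective: alternative
-- what changed: Instead of scanning the flattened grid with a stateful blank counter flushed at 26, B first extracts the index positions of the clue (non-blank) cells and derives each blank-run encoding purely arithmetically from the gap between consecutive clue indices (divmod of the index difference), assembling the pieces with one join.
import Mathlib
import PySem

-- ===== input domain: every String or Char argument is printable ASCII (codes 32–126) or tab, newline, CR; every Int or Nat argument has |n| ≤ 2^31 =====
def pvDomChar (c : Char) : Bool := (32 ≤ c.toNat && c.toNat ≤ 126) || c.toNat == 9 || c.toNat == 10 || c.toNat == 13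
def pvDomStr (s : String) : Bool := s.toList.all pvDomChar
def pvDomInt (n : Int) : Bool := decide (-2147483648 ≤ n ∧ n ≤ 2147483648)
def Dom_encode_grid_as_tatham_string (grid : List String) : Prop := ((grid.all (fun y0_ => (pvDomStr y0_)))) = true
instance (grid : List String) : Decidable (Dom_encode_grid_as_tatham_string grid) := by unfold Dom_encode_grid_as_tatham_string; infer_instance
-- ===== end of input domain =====

-- B replaces A's stateful blank-counter scan by clue-position extraction with arithmetic
-- on index gaps (objective: alternative); return values agree on Pre_.

-- ===== PORT A =====
-- strings are modelled as List Char and converted with String.ofList at the end;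
-- int(cell) for the single characters admitted by Pre_ (digits) is exact as c.toNat - 48
def pvCellA (c : Char) : Int := if c = '-' then -1 else ((c.toNat : Int) - 48)

-- A's final letter-flush (the trailing `if current_blanks > 0` of A)
def pvFinishA (fin : List Char × Int) : List Char :=
  if fin.2 > 0 then fin.1 ++ [Char.ofNat ('a'.toNat + (fin.2 - 1).toNat)] else fin.1

-- one iteration of A's `for num in flattened` loop, state = (puzzle_string, current_blanks)
def pvStepA (st : List Char × Int) (num : Int) : List Char × Int :=
  if num < 0 then
    if st.2 + 1 = 26 then (st.1 ++ ['z'], 0) else (st.1, st.2 + 1)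
  else
    ((if st.2 > 0 then st.1 ++ [Char.ofNat ('a'.toNat + (st.2 - 1).toNat)] else st.1)
       ++ PySem.Int.toChars num, 0)

def encode_grid_as_tatham_string (grid : List String) : String :=
  match grid with
  | [] => "#0x0:"
  | r0 :: _ =>
    if r0 = "" then "#0x0:" else
    -- Pre_ excludes the non-square case, where A raises ValueError
    let header : List Char :=
      '#' :: PySem.Int.toChars (grid.length : Int) ++ 'x' :: PySem.Int.toChars ((r0.toList.length : Int)) ++ [':']
    let flattened : List Int := grid.flatMap (fun row => row.toList.map pvCellA)
    String.ofList (pvFinishA (flattened.foldl pvStepA (header, 0)))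

-- ===== PORT B =====
def pvCellB (c : Char) : Int := if c = '-' then -1 else ((c.toNat : Int) - 48)

-- `blanks(g)`: 'z' * q + remainder letter, q, r = divmod(g, 26)
def pvBlanks (g : Int) : List Char :=
  let q := PySem.Int.floordiv g 26
  let r := PySem.Int.mod g 26
  List.replicate q.toNat 'z' ++ (if r = 0 then [] else [Char.ofNat ('a'.toNat + (r - 1).toNat)])

-- one iteration of B's `for i, n in clues` loop, state = (parts, prev)
def pvStepB (st : List (List Char) × Int) (p : Int × Int) : List (List Char) × Int :=
  (st.1 ++ [pvBlanks (p.1 - st.2 - 1), PySem.Int.toChars p.2], p.1)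

def encode_grid_as_tatham_string_alt (grid : List String) : String :=
  match grid with
  | [] => "#0x0:"
  | r0 :: _ =>
    if r0 = "" then "#0x0:" else
    -- Pre_ excludes the non-square case, where B raises ValueError
    let header : List Char :=
      '#' :: PySem.Int.toChars (grid.length : Int) ++ 'x' :: PySem.Int.toChars ((r0.toList.length : Int)) ++ [':']
    let nums : List Int := grid.flatMap (fun row => row.toList.map pvCellB)
    let clues : List (Int × Int) :=
      (PySem.List.enumerate nums 0).filter (fun p => decide (0 ≤ p.2))
    let r := clues.foldl pvStepB ([header], -1)
    String.ofList (r.1 ++ [pvBlanks ((nums.length : Int) - r.2 - 1)]).flatten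

-- ===== PRECONDITION & SPEC =====
-- Pre_ excludes exactly the inputs where A raises ValueError: a non-empty grid with a
-- non-empty first row that is not square (len(grid) ≠ len(grid[0])), or containing a
-- cell that is neither '-' nor a decimal digit (int(cell) raises).
def Pre_encode_grid_as_tatham_string (grid : List String) : Prop :=
  (grid.isEmpty || (grid.headD "" == "") ||
    ((grid.length == (grid.headD "").toList.length) &&
      grid.all (fun row => row.toList.all (fun c => c == '-' || c.isDigit)))) = true
instance (grid : List String) : Decidable (Pre_encode_grid_as_tatham_string grid) := by
  unfold Pre_encode_grid_as_tatham_string; infer_instance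

def pvWitness_encode_grid_as_tatham_string : List String := ["1-", "-2"]

def Spec_encode_grid_as_tatham_string (grid : List String) (out : String) : Prop := out = encode_grid_as_tatham_string_alt grid
instance (grid : List String) (out : String) : Decidable (Spec_encode_grid_as_tatham_string grid out) := by unfold Spec_encode_grid_as_tatham_string; infer_instance

-- ===== CLAIM (what is proved, stated in full; the proofs are below) =====
def Claim_equal_encode_grid_as_tatham_string : Prop := ∀ (grid : List String), Dom_encode_grid_as_tatham_string grid → Pre_encode_grid_as_tatham_string grid → Spec_encode_grid_as_tatham_string grid (encode_grid_as_tatham_string grid)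

-- ===== LEMMAS AND PROOFS =====

-- A's tail computation as a function of the pending blank count (cb) and the remaining nums
def pvF (cb : Nat) : List Int → List Char
  | [] => if cb > 0 then [Char.ofNat (96 + cb)] else []
  | n :: rest =>
    if n < 0 then
      if cb + 1 = 26 then 'z' :: pvF 0 rest else pvF (cb + 1) rest
    else
      (if cb > 0 then [Char.ofNat (96 + cb)] else []) ++ PySem.Int.toChars n ++ pvF 0 rest

theorem pvLetter_eq (k : Nat) (hk : 0 < k) :
    Char.ofNat (97 + (k - 1)) = Char.ofNat (96 + k) := by
  congr 1; omega

theorem pvLoopA_eq (nums : List Int) : ∀ (s : List Char) (k : Nat), k < 26 →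
    pvFinishA (nums.foldl pvStepA (s, (k : Int))) = s ++ pvF k nums := by
  induction nums with
  | nil =>
    intro s k hk
    by_cases hk0 : 0 < k
    · have h2 : (0:Int) < (k : Int) := by exact_mod_cast hk0
      simp [pvFinishA, pvF, List.foldl, hk0, pvLetter_eq k hk0]
    · have h2 : ¬ ((0:Int) < (k : Int)) := by omega
      simp [pvFinishA, pvF, List.foldl, hk0]
  | cons n rest ih =>
    intro s k hk
    simp only [List.foldl, pvStepA]
    by_cases hn : n < 0
    · simp only [hn, if_true]
      by_cases h26 : (k : Int) + 1 = 26
      · have hk26 : k + 1 = 26 := by exact_mod_cast h26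
        simp only [h26, if_true]
        have h0 := ih (s ++ ['z']) 0 (by omega)
        simp only [Nat.cast_zero] at h0
        rw [h0]
        simp [pvF, hn, hk26]
      · have hk26 : ¬ (k + 1 = 26) := by omega
        rw [if_neg h26]
        have h1 := ih s (k + 1) (by omega)
        push_cast at h1
        rw [h1]
        simp [pvF, hn, hk26]
    · simp only [hn, if_false]
      have h0 := ih ((if (k:Int) > 0 then s ++ [Char.ofNat ('a'.toNat + ((k:Int) - 1).toNat)] else s)
          ++ PySem.Int.toChars n) 0 (by omega)
      simp only [Nat.cast_zero] at h0
      rw [h0]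
      by_cases hk0 : 0 < k
      · have h2 : (0:Int) < (k : Int) := by exact_mod_cast hk0
        have h3 : (((k : Int)) - 1).toNat = k - 1 := by omega
        simp [pvF, hn, hk0, h3, pvLetter_eq k hk0]
      · have h2 : ¬ ((0:Int) < (k : Int)) := by omega
        simp [pvF, hn, hk0]

-- blank runs: pvF over l ++ t when l is all blanks
theorem pvF_blank_run (l : List Int) : ∀ (t : List Int) (k : Nat), (∀ n ∈ l, n < 0) → k < 26 →
    pvF k (l ++ t) = List.replicate ((k + l.length) / 26) 'z' ++ pvF ((k + l.length) % 26) t := by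
  induction l with
  | nil =>
    intro t k _ hk
    simp [Nat.div_eq_of_lt hk, Nat.mod_eq_of_lt hk]
  | cons n l' ih =>
    intro t k hall hk
    have hn : n < 0 := hall n (by simp)
    have hall' : ∀ m ∈ l', m < 0 := fun m hm => hall m (by simp [hm])
    simp only [List.cons_append, pvF, hn, if_true]
    by_cases h26 : k + 1 = 26
    · rw [if_pos h26, ih t 0 hall' (by omega)]
      have hdiv : (k + (l'.length + 1)) / 26 = l'.length / 26 + 1 := by omega
      have hmod : (k + (l'.length + 1)) % 26 = l'.length % 26 := by omega
      simp [hdiv, hmod, List.replicate_succ]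
    · rw [if_neg h26, ih t (k + 1) hall' (by omega)]
      have h1 : k + 1 + l'.length = k + (l'.length + 1) := by omega
      simp [h1]

-- B's blanks(g) on a natural-number gap, in Nat form
def pvBlanksN (g : Nat) : List Char :=
  List.replicate (g / 26) 'z' ++ (if g % 26 = 0 then [] else [Char.ofNat (96 + g % 26)])

theorem pvBlanks_natCast (m : Nat) : pvBlanks (m : Int) = pvBlanksN m := by
  have hq : PySem.Int.floordiv (m : Int) 26 = ((m / 26 : Nat) : Int) := by
    exact_mod_cast PySem.Int.floordiv_natCast m 26
  have hr : PySem.Int.mod (m : Int) 26 = ((m % 26 : Nat) : Int) := by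
    exact_mod_cast PySem.Int.mod_natCast m 26
  unfold pvBlanks pvBlanksN
  simp only [hq, hr, Int.toNat_natCast]
  by_cases hz : m % 26 = 0
  · simp [hz]
  · have h1 : ¬ (((m % 26 : Nat) : Int) = 0) := by exact_mod_cast hz
    rw [if_neg h1, if_neg hz]
    have h2 : (((m % 26 : Nat) : Int) - 1).toNat = m % 26 - 1 := by omega
    rw [h2, show 'a'.toNat = 97 from rfl, pvLetter_eq (m % 26) (by omega)]

-- B's gap encoding as a recursion on the clue structure of nums:
-- d pending blanks, then the leading blank run, then the first clue, then the rest
def pvGapEnc (d : Nat) (nums : List Int) : List Char :=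
  match h : nums.dropWhile (fun n => decide (n < 0)) with
  | [] => pvBlanksN (d + nums.length)
  | n :: t =>
      pvBlanksN (d + (nums.takeWhile (fun n => decide (n < 0))).length)
        ++ PySem.Int.toChars n ++ pvGapEnc 0 t
termination_by nums.length
decreasing_by
  have h1 := List.length_dropWhile_le (fun n => decide (n < 0)) nums
  rw [h] at h1
  simp at h1 ⊢
  omega

theorem pvGapEnc_nil (d : Nat) (nums : List Int)
    (h : nums.dropWhile (fun n => decide (n < 0)) = []) :
    pvGapEnc d nums = pvBlanksN (d + nums.length) := by
  rw [pvGapEnc]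
  split
  · rfl
  · next n t heq => rw [h] at heq; cases heq

theorem pvGapEnc_cons (d : Nat) (nums : List Int) (n : Int) (t : List Int)
    (h : nums.dropWhile (fun n => decide (n < 0)) = n :: t) :
    pvGapEnc d nums = pvBlanksN (d + (nums.takeWhile (fun n => decide (n < 0))).length)
      ++ PySem.Int.toChars n ++ pvGapEnc 0 t := by
  rw [pvGapEnc]
  split
  · next heq => rw [h] at heq; cases heq
  · next n' t' heq =>
    rw [h] at heq
    cases heq
    rfl

theorem pvDropWhile_head {α : Type} (p : α → Bool) :
    ∀ (l : List α) (x : α) (t : List α), l.dropWhile p = x :: t → p x = false := by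
  intro l
  induction l with
  | nil => intro x t h; simp [List.dropWhile] at h
  | cons a l' ih =>
    intro x t h
    rw [List.dropWhile_cons] at h
    by_cases ha : p a = true
    · rw [if_pos ha] at h; exact ih x t h
    · rw [if_neg ha] at h; cases h; simpa using ha

-- Step 1: A's counter loop computes B's gap encoding (both as functions of nums)
theorem pvF_eq_gapEnc_aux : ∀ (N : Nat) (nums : List Int), nums.length ≤ N →
    pvF 0 nums = pvGapEnc 0 nums := by
  intro N
  induction N with
  | zero =>
    intro nums h
    have hnil : nums = [] := List.eq_nil_of_length_eq_zero (by omega)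
    subst hnil
    rw [pvGapEnc_nil 0 [] (by simp)]
    simp [pvF, pvBlanksN]
  | succ N ihN =>
    intro nums h
    have hsplit := List.takeWhile_append_dropWhile
      (p := fun n : Int => decide (n < 0)) (l := nums)
    have hall : ∀ m ∈ nums.takeWhile (fun n : Int => decide (n < 0)), m < 0 := by
      intro m hm
      have := List.mem_takeWhile_imp hm
      simpa using this
    cases hdrop : nums.dropWhile (fun n : Int => decide (n < 0)) with
    | nil =>
      have hallnums : ∀ m ∈ nums, m < 0 := by
        intro m hm
        have := List.dropWhile_eq_nil_iff.mp hdrop m hm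
        simpa using this
      have hrun := pvF_blank_run nums [] 0 hallnums (by omega)
      rw [List.append_nil] at hrun
      rw [hrun, pvGapEnc_nil 0 nums hdrop]
      unfold pvBlanksN
      simp only [Nat.zero_add]
      by_cases hz : nums.length % 26 = 0
      · simp [pvF, hz]
      · have hpos : 0 < nums.length % 26 := Nat.pos_of_ne_zero hz
        simp [pvF, hz, hpos]
    | cons n t =>
      have hn : ¬ n < 0 := by
        have := pvDropWhile_head _ nums n t hdrop
        simpa using this
      have hlen2 : nums.length
          = (nums.takeWhile (fun n : Int => decide (n < 0))).length + t.length + 1 := by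
        have := congrArg List.length hsplit
        rw [hdrop] at this
        simp at this
        omega
      have hlen : t.length ≤ N := by omega
      have hrun := pvF_blank_run (nums.takeWhile (fun n : Int => decide (n < 0)))
        (n :: t) 0 hall (by omega)
      conv_lhs => rw [← hsplit, hdrop]
      rw [hrun, pvGapEnc_cons 0 nums n t hdrop]
      simp only [Nat.zero_add]
      rw [show pvF ((nums.takeWhile (fun n : Int => decide (n < 0))).length % 26) (n :: t)
            = (if (nums.takeWhile (fun n : Int => decide (n < 0))).length % 26 > 0
                then [Char.ofNat (96 + (nums.takeWhile (fun n : Int => decide (n < 0))).length % 26)]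
                else [])
              ++ PySem.Int.toChars n ++ pvF 0 t from by simp [pvF, hn]]
      rw [ihN t hlen]
      unfold pvBlanksN
      by_cases hz : (nums.takeWhile (fun n : Int => decide (n < 0))).length % 26 = 0
      · simp [hz]
      · have hpos : 0 < (nums.takeWhile (fun n : Int => decide (n < 0))).length % 26 :=
          Nat.pos_of_ne_zero hz
        simp [hz, hpos]

-- Step 2: B's filtered-enumerate fold computes pvGapEnc
theorem pvEnum_blanks_filter_nil (off : Int) :
    ∀ (l : List Int), (∀ m ∈ l, m < 0) →
    (PySem.List.enumerate l off).filter (fun p => decide (0 ≤ p.2)) = [] := by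
  intro l hall
  apply List.filter_eq_nil_iff.mpr
  intro p hp
  rcases (PySem.List.mem_enumerate_iff _ _ _).mp hp with ⟨k, hk, rfl⟩
  have := hall l[k] (List.getElem_mem hk)
  simp; omega

theorem pvFoldB_eq_aux : ∀ (N : Nat) (nums : List Int), nums.length ≤ N →
    ∀ (off prev : Int) (acc : List (List Char)), prev < off →
    (((PySem.List.enumerate nums off).filter (fun p => decide (0 ≤ p.2))).foldl pvStepB (acc, prev)).1.flatten
      ++ pvBlanks (off + (nums.length : Int)
          - (((PySem.List.enumerate nums off).filter (fun p => decide (0 ≤ p.2))).foldl pvStepB (acc, prev)).2 - 1)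
    = acc.flatten ++ pvGapEnc (off - prev - 1).toNat nums := by
  intro N
  induction N with
  | zero =>
    intro nums h off prev acc hpo
    have hnil : nums = [] := List.eq_nil_of_length_eq_zero (by omega)
    subst hnil
    rw [pvGapEnc_nil _ [] (by simp)]
    have hcast : off + (([] : List Int).length : Int) - prev - 1
        = ((((off - prev - 1).toNat + ([] : List Int).length : Nat) : Int)) := by
      simp; omega
    simp only [PySem.List.enumerate_nil, List.filter_nil, List.foldl_nil, hcast,
      pvBlanks_natCast]
  | succ N ihN =>
    intro nums h off prev acc hpo
    have hsplit := List.takeWhile_append_dropWhile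
      (p := fun n : Int => decide (n < 0)) (l := nums)
    have hall : ∀ m ∈ nums.takeWhile (fun n : Int => decide (n < 0)), m < 0 := by
      intro m hm
      have := List.mem_takeWhile_imp hm
      simpa using this
    have hfilter : (PySem.List.enumerate nums off).filter (fun q => decide (0 ≤ q.2))
        = (PySem.List.enumerate (nums.dropWhile (fun n : Int => decide (n < 0)))
            (off + ((nums.takeWhile (fun n : Int => decide (n < 0))).length : Int))).filter
            (fun q => decide (0 ≤ q.2)) := by
      conv_lhs => rw [← hsplit]
      rw [PySem.List.enumerate_append, List.filter_append,
        pvEnum_blanks_filter_nil off _ hall, List.nil_append]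
    cases hdrop : nums.dropWhile (fun n : Int => decide (n < 0)) with
    | nil =>
      rw [hfilter, hdrop]
      simp only [PySem.List.enumerate_nil, List.filter_nil, List.foldl_nil]
      rw [pvGapEnc_nil _ nums hdrop]
      have hcast : off + (nums.length : Int) - prev - 1
          = ((((off - prev - 1).toNat + nums.length : Nat) : Int)) := by
        push_cast; omega
      rw [hcast, pvBlanks_natCast]
    | cons n t =>
      have hn : ¬ n < 0 := by
        have := pvDropWhile_head _ nums n t hdrop
        simpa using this
      have hlen2 : nums.length
          = (nums.takeWhile (fun n : Int => decide (n < 0))).length + t.length + 1 := by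
        have := congrArg List.length hsplit
        rw [hdrop] at this
        simp at this
        omega
      have hlen : t.length ≤ N := by omega
      rw [hfilter, hdrop, PySem.List.enumerate_cons,
        List.filter_cons_of_pos (by simp; omega), List.foldl_cons]
      rw [show pvStepB (acc, prev)
            (off + ((nums.takeWhile (fun n : Int => decide (n < 0))).length : Int), n)
          = (acc ++ [pvBlanks (off + ((nums.takeWhile (fun n : Int => decide (n < 0))).length : Int) - prev - 1),
              PySem.Int.toChars n],
             off + ((nums.takeWhile (fun n : Int => decide (n < 0))).length : Int)) from rfl]
      have key := ihN t hlen
        (off + ((nums.takeWhile (fun n : Int => decide (n < 0))).length : Int) + 1)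
        (off + ((nums.takeWhile (fun n : Int => decide (n < 0))).length : Int))
        (acc ++ [pvBlanks (off + ((nums.takeWhile (fun n : Int => decide (n < 0))).length : Int) - prev - 1),
          PySem.Int.toChars n]) (by omega)
      have harg : off + ((nums.takeWhile (fun n : Int => decide (n < 0))).length : Int) + 1 + (t.length : Int)
          = off + (nums.length : Int) := by
        rw [hlen2]; push_cast; ring
      rw [harg, show (off + ((nums.takeWhile (fun n : Int => decide (n < 0))).length : Int) + 1
            - (off + ((nums.takeWhile (fun n : Int => decide (n < 0))).length : Int)) - 1).toNat = 0
          from by omega] at key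
      rw [key, pvGapEnc_cons _ nums n t hdrop]
      have hgap : pvBlanks (off + ((nums.takeWhile (fun n : Int => decide (n < 0))).length : Int) - prev - 1)
          = pvBlanksN ((off - prev - 1).toNat + (nums.takeWhile (fun n : Int => decide (n < 0))).length) := by
        have hcast : off + ((nums.takeWhile (fun n : Int => decide (n < 0))).length : Int) - prev - 1
            = ((((off - prev - 1).toNat + (nums.takeWhile (fun n : Int => decide (n < 0))).length : Nat) : Int)) := by
          push_cast; omega
        rw [hcast, pvBlanks_natCast]
      rw [List.flatten_append, hgap]
      simp

-- ===== VERDICT (by name: the statement is the Claim_ definition above) =====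
theorem encode_grid_as_tatham_string_spec : Claim_equal_encode_grid_as_tatham_string := by
  intro grid _ _
  unfold Spec_encode_grid_as_tatham_string
  cases grid with
  | nil => rfl
  | cons r0 rows =>
    by_cases h0 : r0 = ""
    · simp [encode_grid_as_tatham_string, encode_grid_as_tatham_string_alt, h0]
    · simp only [encode_grid_as_tatham_string, encode_grid_as_tatham_string_alt, if_neg h0]
      rw [show pvCellB = pvCellA from rfl]
      set header : List Char :=
        '#' :: PySem.Int.toChars (((r0 :: rows).length : Int)) ++
          'x' :: PySem.Int.toChars ((r0.toList.length : Int)) ++ [':'] with hh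
      set nums : List Int := (r0 :: rows).flatMap (fun row => row.toList.map pvCellA) with hnums
      have hA := pvLoopA_eq nums header 0 (by omega)
      simp only [Nat.cast_zero] at hA
      rw [hA]
      have hB := pvFoldB_eq_aux nums.length nums le_rfl 0 (-1) [header] (by omega)
      have h1 : ((0:Int) - (-1) - 1).toNat = 0 := by omega
      rw [h1] at hB
      have h2 : (0:Int) + (nums.length : Int) = (nums.length : Int) := by ring
      rw [h2] at hB
      congr 1
      rw [List.flatten_append]
      simp only [List.flatten_cons, List.flatten_nil, List.append_nil] at hB ⊢
      rw [hB]
      rw [pvF_eq_gapEnc_aux nums.length nums le_rfl]
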